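-- pv_equiv track=rewrite | github.com/cracrazjf/xAyBz | src/test_metric.py | split_on_target
-- ===== SOURCE A (Python) =====
-- def split_on_target(labels, preds, logits, target):
--     labels_result, preds_result = [], []
--     labels_current, preds_current = [], []
--     logits_result, logits_current = [], []
--     for i, token in enumerate(labels):
--         labels_current.append(token)
--         preds_current.append(preds[i])
--         logits_current.append(logits[i])
--         if token == target:
--             labels_result.append(labels_current)
--             preds_result.append(preds_current)
--             logits_result.append(logits_current)
--             labels_current, preds_current, logits_current = [], [], []
--     if labels_current:
--         labels_result.append(labels_current)
--         preds_result.append(preds_current)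
--         logits_result.append(logits_current)
--     return labels_result, preds_result, logits_result
-- ===== SOURCE B (Python) =====
-- def split_on_target(labels, preds, logits, target):
--     # One pass to find the cut points (positions just after each target),
--     # then build all three result lists by slicing/indexing between consecutive cuts.
--     n = len(labels)
--     cuts = [i + 1 for i, t in enumerate(labels) if t == target]
--     if n > (cuts[-1] if cuts else 0):
--         cuts.append(n)  # trailing chunk only when there is a non-empty leftover
--     starts = [0] + cuts[:-1]
--     seg = list(zip(starts, cuts))
--     labels_result = [labels[s:e] for s, e in seg]
--     preds_result = [[preds[i] for i in range(s, e)] for s, e in seg]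
--     logits_result = [[logits[i] for i in range(s, e)] for s, e in seg]
--     return labels_result, preds_result, logits_result
-- ===== Notes on version B (the rewrite author's own statement) =====
-- stated objective: alternative
-- what changed: B first collects the cut positions (index+1 of each target in labels) in one scan and then builds all three result lists by slicing/indexing between consecutive cut boundaries, instead of A's single loop that grows and flushes three parallel accumulator lists element by element.
import Mathlib
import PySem

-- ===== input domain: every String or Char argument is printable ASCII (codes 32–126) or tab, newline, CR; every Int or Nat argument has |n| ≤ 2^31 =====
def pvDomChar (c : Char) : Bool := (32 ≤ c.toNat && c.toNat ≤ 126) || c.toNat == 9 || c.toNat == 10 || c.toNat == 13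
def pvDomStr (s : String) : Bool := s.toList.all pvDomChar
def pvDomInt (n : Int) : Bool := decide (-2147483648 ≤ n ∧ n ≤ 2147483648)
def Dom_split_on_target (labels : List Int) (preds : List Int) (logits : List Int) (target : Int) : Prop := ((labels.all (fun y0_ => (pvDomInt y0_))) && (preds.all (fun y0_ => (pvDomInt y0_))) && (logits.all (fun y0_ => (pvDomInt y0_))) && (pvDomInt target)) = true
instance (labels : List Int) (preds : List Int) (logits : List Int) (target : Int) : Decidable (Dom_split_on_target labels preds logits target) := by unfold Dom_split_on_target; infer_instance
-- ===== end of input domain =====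

-- B rebuilds the result from the cut points (one scan for the positions after each target,
-- then slices between consecutive cuts) instead of A's element-by-element accumulator loop;
-- objective: alternative decomposition, same asymptotic cost.

-- ===== PORT A =====
-- the for-loop of A as structural recursion over enumerate(labels); state = the six lists.
-- preds[i] / logits[i]: in range under Pre_ (out of range is Python's IndexError, excluded there).
def splitA_loop (preds logits : List Int) (target : Int) :
    List (Int × Int) → List (List Int) → List (List Int) → List (List Int) →
    List Int → List Int → List Int → List (List Int) × List (List Int) × List (List Int)
  | [], lr, pr, gr, lc, pc, gc =>
      if lc ≠ [] then (lr ++ [lc], pr ++ [pc], gr ++ [gc]) else (lr, pr, gr)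
  | (i, tok) :: rest, lr, pr, gr, lc, pc, gc =>
      let lc' := lc ++ [tok]
      let pc' := pc ++ [PySem.List.pyGetD preds i 0]
      let gc' := gc ++ [PySem.List.pyGetD logits i 0]
      if tok == target then
        splitA_loop preds logits target rest (lr ++ [lc']) (pr ++ [pc']) (gr ++ [gc']) [] [] []
      else
        splitA_loop preds logits target rest lr pr gr lc' pc' gc'

def split_on_target (labels : List Int) (preds : List Int) (logits : List Int) (target : Int) : List (List Int) × List (List Int) × List (List Int) :=
  splitA_loop preds logits target (PySem.List.enumerate labels 0) [] [] [] [] [] []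

-- ===== PORT B =====
def split_on_target_alt (labels : List Int) (preds : List Int) (logits : List Int) (target : Int) : List (List Int) × List (List Int) × List (List Int) :=
  let n : Int := labels.length
  let cuts : List Int := (PySem.List.enumerate labels 0).filterMap
      (fun p => if p.2 == target then some (p.1 + 1) else none)
  let cuts' : List Int := if n > (match cuts.getLast? with | some c => c | none => 0) then cuts ++ [n] else cuts
  let starts : List Int := 0 :: PySem.List.slice cuts' none (some (-1))
  let seg := starts.zip cuts'
  (seg.map (fun p => PySem.List.slice labels (some p.1) (some p.2)),
   seg.map (fun p => (PySem.List.pyRange p.1 p.2 1).map (fun i => PySem.List.pyGetD preds i 0)),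
   seg.map (fun p => (PySem.List.pyRange p.1 p.2 1).map (fun i => PySem.List.pyGetD logits i 0)))

-- ===== PRECONDITION & SPEC =====
-- Pre_ excludes exactly the inputs where Python A raises IndexError: preds or logits shorter than labels.
def Pre_split_on_target (labels : List Int) (preds : List Int) (logits : List Int) (target : Int) : Prop :=
  labels.length ≤ preds.length ∧ labels.length ≤ logits.length
instance (labels : List Int) (preds : List Int) (logits : List Int) (target : Int) : Decidable (Pre_split_on_target labels preds logits target) := by unfold Pre_split_on_target; infer_instance

def pvWitness_split_on_target : List Int × List Int × List Int × Int := ([1, 2, 1], [5, 6, 7], [8, 9, 10], 1)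

def Spec_split_on_target (labels : List Int) (preds : List Int) (logits : List Int) (target : Int) (out : List (List Int) × List (List Int) × List (List Int)) : Prop := out = split_on_target_alt labels preds logits target
instance (labels : List Int) (preds : List Int) (logits : List Int) (target : Int) (out : List (List Int) × List (List Int) × List (List Int)) : Decidable (Spec_split_on_target labels preds logits target out) := by unfold Spec_split_on_target; infer_instance

-- ===== CLAIM (what is proved, stated in full; the proofs are below) =====
def Claim_equal_split_on_target : Prop := ∀ (labels : List Int) (preds : List Int) (logits : List Int) (target : Int), Dom_split_on_target labels preds logits target → Pre_split_on_target labels preds logits target → Spec_split_on_target labels preds logits target (split_on_target labels preds logits target)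

-- ===== LEMMAS AND PROOFS =====

-- reference recursion: process the remaining labels from absolute index s with current chunks lc/pc/gc
def segs (preds logits : List Int) (target : Int) :
    List Int → Int → List Int → List Int → List Int → List (List Int) × List (List Int) × List (List Int)
  | [], _, lc, pc, gc => if lc ≠ [] then ([lc], [pc], [gc]) else ([], [], [])
  | tok :: rest, s, lc, pc, gc =>
      if tok == target then
        let r := segs preds logits target rest (s + 1) [] [] []
        ((lc ++ [tok]) :: r.1, (pc ++ [PySem.List.pyGetD preds s 0]) :: r.2.1,
         (gc ++ [PySem.List.pyGetD logits s 0]) :: r.2.2)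
      else
        segs preds logits target rest (s + 1) (lc ++ [tok]) (pc ++ [PySem.List.pyGetD preds s 0]) (gc ++ [PySem.List.pyGetD logits s 0])

def app3 (lr pr gr : List (List Int)) (r : List (List Int) × List (List Int) × List (List Int)) :
    List (List Int) × List (List Int) × List (List Int) :=
  (lr ++ r.1, pr ++ r.2.1, gr ++ r.2.2)

def glue3 (lc pc gc : List Int) (r : List (List Int) × List (List Int) × List (List Int)) :
    List (List Int) × List (List Int) × List (List Int) :=
  match r with
  | (L0 :: Lr, P0 :: Pr, G0 :: Gr) => ((lc ++ L0) :: Lr, (pc ++ P0) :: Pr, (gc ++ G0) :: Gr)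
  | _ => if lc ≠ [] then ([lc], [pc], [gc]) else ([], [], [])

def cutsOf (target : Int) (rest : List Int) (s : Int) : List Int :=
  (PySem.List.enumerate rest s).filterMap (fun p => if p.2 == target then some (p.1 + 1) else none)

def lastD (l : List Int) (d : Int) : Int :=
  match l.getLast? with
  | some c => c
  | none => d

def segOf (target : Int) (rest : List Int) (s : Int) : List (Int × Int) :=
  let n : Int := s + rest.length
  let cuts := cutsOf target rest s
  let cuts' := if n > lastD cuts s then cuts ++ [n] else cuts
  (s :: PySem.List.slice cuts' none (some (-1))).zip cuts'

def mkres (labels preds logits : List Int) (seg : List (Int × Int)) :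
    List (List Int) × List (List Int) × List (List Int) :=
  (seg.map (fun p => PySem.List.slice labels (some p.1) (some p.2)),
   seg.map (fun p => (PySem.List.pyRange p.1 p.2 1).map (fun i => PySem.List.pyGetD preds i 0)),
   seg.map (fun p => (PySem.List.pyRange p.1 p.2 1).map (fun i => PySem.List.pyGetD logits i 0)))

lemma alt_eq_mkres (labels preds logits : List Int) (target : Int) :
    split_on_target_alt labels preds logits target = mkres labels preds logits (segOf target labels 0) := by
  simp [split_on_target_alt, mkres, segOf, cutsOf, lastD]

lemma lastD_nil (d : Int) : lastD [] d = d := rfl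

lemma lastD_cons (a : Int) (l : List Int) (d : Int) : lastD (a :: l) d = lastD l a := by
  cases l with
  | nil => rfl
  | cons b tl =>
    cases h : (b :: tl).getLast? with
    | some c => simp [lastD, List.getLast?_cons_cons, h]
    | none => simp [List.getLast?_eq_none_iff] at h

lemma cutsOf_nil (target : Int) (s : Int) : cutsOf target [] s = [] := by
  simp [cutsOf, PySem.List.enumerate_nil]

lemma cutsOf_cons (target tok : Int) (rest : List Int) (s : Int) :
    cutsOf target (tok :: rest) s =
      (if tok == target then [s + 1] else []) ++ cutsOf target rest (s + 1) := by
  simp only [cutsOf, PySem.List.enumerate_cons, List.filterMap_cons]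
  by_cases h : tok == target <;> simp [h]

lemma le_of_mem_cutsOf (target : Int) (rest : List Int) (s c : Int)
    (h : c ∈ cutsOf target rest s) : s + 1 ≤ c := by
  simp only [cutsOf, List.mem_filterMap] at h
  obtain ⟨p, hp, hc⟩ := h
  rw [PySem.List.mem_enumerate_iff] at hp
  obtain ⟨k, hk, rfl⟩ := hp
  by_cases ht : rest[k] == target
  · simp only [ht, if_true, Option.some.injEq] at hc
    omega
  · simp [ht] at hc

lemma glue3_nil_mkres (labels preds logits : List Int) (seg : List (Int × Int)) :
    glue3 [] [] [] (mkres labels preds logits seg) = mkres labels preds logits seg := by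
  cases seg <;> simp [glue3, mkres]

lemma glue3_glue3 (lc pc gc a b c : List Int) (r : List (List Int) × List (List Int) × List (List Int))
    (ha : a ≠ []) :
    glue3 lc pc gc (glue3 a b c r) = glue3 (lc ++ a) (pc ++ b) (gc ++ c) r := by
  obtain ⟨L, P, G⟩ := r
  have hla : lc ++ a ≠ [] := by simp [ha]
  cases L <;> cases P <;> cases G <;> simp [glue3, ha, hla]

lemma drop_succ_of_drop_cons {labels rest : List Int} {tok : Int} {m : Nat}
    (h : labels.drop m = tok :: rest) : labels.drop (m + 1) = rest := by
  have h2 : labels.drop (m + 1) = List.drop 1 (List.drop m labels) := by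
    rw [List.drop_drop, Nat.add_comm]
  rw [h2, h]
  simp

lemma slice_cons_of_drop (labels rest : List Int) (tok : Int) (m : Nat) (e : Int)
    (hdrop : labels.drop m = tok :: rest) (he : (m : Int) < e) :
    PySem.List.slice labels (some (m : Int)) (some e) =
      tok :: PySem.List.slice labels (some ((m : Int) + 1)) (some e) := by
  have h0 : (0 : Int) ≤ (m : Int) := by positivity
  have h1 : (0 : Int) ≤ (m : Int) + 1 := by omega
  have he' : (0 : Int) ≤ e := by omega
  rw [PySem.List.slice_toNat labels h0 he', PySem.List.slice_toNat labels h1 he']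
  have hm : ((m : Int)).toNat = m := by omega
  have hm1 : ((m : Int) + 1).toNat = m + 1 := by omega
  rw [hm, hm1, hdrop, drop_succ_of_drop_cons hdrop]
  have h3 : e.toNat - m = (e.toNat - (m + 1)) + 1 := by omega
  rw [h3, List.take_succ_cons]

lemma slice_singleton_of_drop (labels rest : List Int) (tok : Int) (m : Nat)
    (hdrop : labels.drop m = tok :: rest) :
    PySem.List.slice labels (some (m : Int)) (some ((m : Int) + 1)) = [tok] := by
  rw [slice_cons_of_drop labels rest tok m ((m : Int) + 1) hdrop (by omega)]
  have h1 : (0 : Int) ≤ (m : Int) + 1 := by omega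
  rw [PySem.List.slice_toNat labels h1 h1]
  simp

-- distribute the trailing-cut `if` over a cons at the head of the cut list
lemma cuts_if_cons (C : List Int) (a n d : Int) :
    (if n > lastD (a :: C) d then (a :: C) ++ [n] else a :: C)
      = a :: (if n > lastD C a then C ++ [n] else C) := by
  rw [lastD_cons]
  by_cases h : n > lastD C a <;> simp [h]

-- peel the leading segment off the zip of starts with cuts
lemma zip_starts_cons (s a : Int) (C : List Int) :
    (s :: PySem.List.slice (a :: C) none (some (-1))).zip (a :: C)
      = (s, a) :: (a :: PySem.List.slice C none (some (-1))).zip C := by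
  rw [PySem.List.slice_to_neg_one, PySem.List.slice_to_neg_one]
  cases C with
  | nil => simp
  | cons c tl => simp [List.dropLast_cons₂]

lemma segOf_nil (target : Int) (s : Int) : segOf target [] s = [] := by
  simp [segOf, cutsOf_nil, lastD_nil]

lemma segOf_cons_target (target tok : Int) (rest : List Int) (s : Int) (htok : tok = target) :
    segOf target (tok :: rest) s = (s, s + 1) :: segOf target rest (s + 1) := by
  have hbeq : (tok == target) = true := by simp [htok]
  simp only [segOf, cutsOf_cons, hbeq, if_true, List.singleton_append, List.length_cons,
    Nat.cast_add, Nat.cast_one]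
  rw [show s + ((rest.length : Int) + 1) = (s + 1) + (rest.length : Int) by ring]
  rw [cuts_if_cons]
  rw [zip_starts_cons]

lemma segOf_cons_other (target tok : Int) (rest : List Int) (s : Int) (htok : ¬ tok = target) :
    (rest = [] ∧ segOf target (tok :: rest) s = [(s, s + 1)] ∧ segOf target rest (s + 1) = [])
    ∨ ∃ e tl, segOf target rest (s + 1) = (s + 1, e) :: tl ∧
        segOf target (tok :: rest) s = (s, e) :: tl ∧ s < e := by
  have hbeq : (tok == target) = false := by simp [htok]
  cases hC : cutsOf target rest (s + 1) with
  | nil =>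
    cases rest with
    | nil =>
      left
      refine ⟨rfl, ?_, segOf_nil target (s + 1)⟩
      simp only [segOf, cutsOf_cons, hbeq, Bool.false_eq_true, if_false, List.nil_append,
        cutsOf_nil, lastD_nil, List.length_cons, List.length_nil, Nat.cast_zero, Nat.cast_add,
        Nat.cast_one]
      split_ifs with h
      · simp [PySem.List.slice_to_neg_one]
      · exfalso; omega
    | cons x xs =>
      right
      refine ⟨(s + 1) + ((x :: xs).length : Int), [], ?_, ?_, ?_⟩
      · simp only [segOf, hC, lastD_nil, List.length_cons, Nat.cast_add, Nat.cast_one]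
        split_ifs with h
        · simp [PySem.List.slice_to_neg_one]
        · exfalso; omega
      · simp only [segOf, cutsOf_cons, hbeq, Bool.false_eq_true, if_false, List.nil_append, hC,
          lastD_nil, List.length_cons, Nat.cast_add, Nat.cast_one]
        split_ifs with h
        · simp only [PySem.List.slice_to_neg_one, List.dropLast_singleton, List.zip_cons_cons,
            List.zip_nil_right]
          ring_nf
        · exfalso; omega
      · omega
  | cons c tl =>
    right
    have hc : s + 2 ≤ c := by
      have hmem := le_of_mem_cutsOf target rest (s + 1) c (by rw [hC]; exact List.mem_cons_self ..)
      omega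
    have hlast : lastD (c :: tl) s = lastD (c :: tl) (s + 1) := by
      rw [lastD_cons, lastD_cons]
    have hshape : ∃ tl₂, (if (s + 1) + (rest.length : Int) > lastD (c :: tl) (s + 1)
        then (c :: tl) ++ [(s + 1) + (rest.length : Int)] else c :: tl) = c :: tl₂ := by
      by_cases h : (s + 1) + (rest.length : Int) > lastD (c :: tl) (s + 1)
      · exact ⟨tl ++ [(s + 1) + (rest.length : Int)], by simp [h]⟩
      · exact ⟨tl, by simp [h]⟩
    obtain ⟨tl₂, htl₂⟩ := hshape
    refine ⟨c, (c :: PySem.List.slice tl₂ none (some (-1))).zip tl₂, ?_, ?_, by omega⟩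
    · simp only [segOf, hC]
      rw [htl₂, zip_starts_cons]
    · simp only [segOf, cutsOf_cons, hbeq, Bool.false_eq_true, if_false, List.nil_append, hC,
        List.length_cons, Nat.cast_add, Nat.cast_one]
      rw [show s + ((rest.length : Int) + 1) = (s + 1) + (rest.length : Int) by ring]
      rw [hlast, htl₂, zip_starts_cons]

lemma mkres_cons_pair (labels preds logits : List Int) (a b : Int) (seg : List (Int × Int)) :
    mkres labels preds logits ((a, b) :: seg) =
      (PySem.List.slice labels (some a) (some b) :: (mkres labels preds logits seg).1,
       ((PySem.List.pyRange a b 1).map (fun i => PySem.List.pyGetD preds i 0)) :: (mkres labels preds logits seg).2.1,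
       ((PySem.List.pyRange a b 1).map (fun i => PySem.List.pyGetD logits i 0)) :: (mkres labels preds logits seg).2.2) := by
  simp [mkres]

lemma pyrange_map_cons (xs : List Int) (s e : Int) (h : s < e) :
    (PySem.List.pyRange s e 1).map (fun i => PySem.List.pyGetD xs i 0) =
      PySem.List.pyGetD xs s 0 :: (PySem.List.pyRange (s + 1) e 1).map (fun i => PySem.List.pyGetD xs i 0) := by
  rw [PySem.List.pyRange_one_cons h, List.map_cons]

lemma mkres_cons_other (labels preds logits rest : List Int) (target tok : Int) (m : Nat)
    (hdrop : labels.drop m = tok :: rest) (htok : ¬ tok = target) :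
    mkres labels preds logits (segOf target (tok :: rest) (m : Int)) =
      glue3 [tok] [PySem.List.pyGetD preds (m : Int) 0] [PySem.List.pyGetD logits (m : Int) 0]
        (mkres labels preds logits (segOf target rest ((m : Int) + 1))) := by
  rcases segOf_cons_other target tok rest (m : Int) htok with ⟨hrest, h1, h2⟩ | ⟨e, tl, h1, h2, hlt⟩
  · rw [h1, h2, mkres_cons_pair]
    rw [slice_singleton_of_drop labels rest tok m hdrop]
    rw [pyrange_map_cons preds (m : Int) ((m : Int) + 1) (by omega)]
    rw [pyrange_map_cons logits (m : Int) ((m : Int) + 1) (by omega)]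
    rw [PySem.List.pyRange_one_eq_nil (le_refl _)]
    simp [mkres, glue3]
  · rw [h1, h2, mkres_cons_pair, mkres_cons_pair]
    rw [slice_cons_of_drop labels rest tok m e hdrop hlt]
    rw [pyrange_map_cons preds (m : Int) e hlt, pyrange_map_cons logits (m : Int) e hlt]
    simp [glue3]

lemma segs_eq_mkres (labels preds logits : List Int) (target : Int) :
    ∀ (rest : List Int) (m : Nat) (lc pc gc : List Int), labels.drop m = rest →
      segs preds logits target rest (m : Int) lc pc gc =
        glue3 lc pc gc (mkres labels preds logits (segOf target rest (m : Int))) := by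
  intro rest
  induction rest with
  | nil =>
    intro m lc pc gc _
    rw [segOf_nil]
    by_cases hlc : lc = [] <;> simp [segs, mkres, glue3, hlc]
  | cons tok rest ih =>
    intro m lc pc gc hdrop
    have hdrop' : labels.drop (m + 1) = rest := drop_succ_of_drop_cons hdrop
    have hcast : ((m : Int) + 1) = ((m + 1 : Nat) : Int) := by push_cast; ring
    by_cases htok : tok = target
    · rw [segOf_cons_target target tok rest (m : Int) htok, mkres_cons_pair]
      rw [slice_singleton_of_drop labels rest tok m hdrop]
      rw [pyrange_map_cons preds (m : Int) ((m : Int) + 1) (by omega)]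
      rw [pyrange_map_cons logits (m : Int) ((m : Int) + 1) (by omega)]
      rw [PySem.List.pyRange_one_eq_nil (le_refl _), List.map_nil]
      have hr : segs preds logits target rest ((m : Int) + 1) [] [] [] =
          mkres labels preds logits (segOf target rest ((m : Int) + 1)) := by
        rw [hcast, ih (m + 1) [] [] [] hdrop', glue3_nil_mkres]
      have hbeq : (tok == target) = true := by simp [htok]
      simp only [segs, hbeq, if_true]
      rw [hr]
      simp [glue3]
    · have hbeq : (tok == target) = false := by simp [htok]
      simp only [segs, hbeq, Bool.false_eq_true, if_false]
      rw [mkres_cons_other labels preds logits rest target tok m hdrop htok]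
      rw [glue3_glue3 _ _ _ _ _ _ _ (by simp)]
      rw [hcast, ih (m + 1) _ _ _ hdrop']

lemma splitA_eq (preds logits : List Int) (target : Int) :
    ∀ (labls : List Int) (s : Int) (lr pr gr : List (List Int)) (lc pc gc : List Int),
      splitA_loop preds logits target (PySem.List.enumerate labls s) lr pr gr lc pc gc =
        app3 lr pr gr (segs preds logits target labls s lc pc gc) := by
  intro labls
  induction labls with
  | nil =>
    intro s lr pr gr lc pc gc
    by_cases hlc : lc = [] <;>
      simp [PySem.List.enumerate_nil, splitA_loop, segs, app3, hlc]
  | cons tok rest ih =>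
    intro s lr pr gr lc pc gc
    rw [PySem.List.enumerate_cons]
    by_cases htok : (tok == target) = true
    · simp only [splitA_loop, htok, if_true, segs]
      rw [ih]
      simp [app3]
    · simp only [splitA_loop, htok, Bool.false_eq_true, if_false, segs]
      rw [ih]

-- ===== VERDICT (by name: the statement is the Claim_ definition above) =====
theorem split_on_target_spec : Claim_equal_split_on_target := by
  intro labels preds logits target _ _
  unfold Spec_split_on_target
  rw [alt_eq_mkres]
  show splitA_loop preds logits target (PySem.List.enumerate labels 0) [] [] [] [] [] [] = _
  rw [splitA_eq]
  have h0 : ((0 : Nat) : Int) = (0 : Int) := rfl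
  rw [← h0, segs_eq_mkres labels preds logits target labels 0 [] [] [] (by simp), h0]
  rw [glue3_nil_mkres]
  simp [app3]
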